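-- pv_equiv track=rewrite | github.com/tianmiantech/WeFe | kernel/security/cipher_compressor/packer.py | unpack2
-- ===== SOURCE A (Python) =====
-- def unpack2(compressed_plain_text, cur_cipher_contained=0, padding_num=0):
--     if cur_cipher_contained == 1:
--         return [compressed_plain_text]
--
--     unpack_result = []
--     bit_len = (padding_num - 1).bit_length()
--     for i in range(cur_cipher_contained):
--         num = (compressed_plain_text & (padding_num - 1))
--         compressed_plain_text = compressed_plain_text >> bit_len
--         unpack_result.insert(0, num)
--
--     return unpack_result
-- ===== SOURCE B (Python) =====
-- def unpack2(compressed_plain_text, cur_cipher_contained=0, padding_num=0):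
--     if cur_cipher_contained == 1:
--         return [compressed_plain_text]
--     if cur_cipher_contained < 1:
--         return []
--     mask = padding_num - 1
--     bit_len = mask.bit_length()
--
--     def split(x, n):
--         # n >= 1 digits of x, most significant first, by halving the digit count
--         if n == 1:
--             return [x & mask]
--         low = n // 2
--         low_bits = bit_len * low
--         return split(x >> low_bits, n - low) + split(x & ((1 << low_bits) - 1), low)
--
--     return split(compressed_plain_text, cur_cipher_contained)
-- ===== Notes on version B (the rewrite author's own statement) =====
-- stated objective: faster
-- what changed: Replaces A's linear shift-and-insert(0) loop (which reshifts the whole big integer every iteration and pays quadratic list-front insertions) by a divide-and-conquer split: the digit count is halved, the integer is cut once into a high and a low part, and the two halves are unpacked recursively and concatenated.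
-- outside the precondition, e.g. on unpack2(-1, 2, 0): A returns [-1, -1], B returns [-1, 1]; on unpack2(5, 2, 0): A returns [2, 5], B returns [2, 1]
import Mathlib
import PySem

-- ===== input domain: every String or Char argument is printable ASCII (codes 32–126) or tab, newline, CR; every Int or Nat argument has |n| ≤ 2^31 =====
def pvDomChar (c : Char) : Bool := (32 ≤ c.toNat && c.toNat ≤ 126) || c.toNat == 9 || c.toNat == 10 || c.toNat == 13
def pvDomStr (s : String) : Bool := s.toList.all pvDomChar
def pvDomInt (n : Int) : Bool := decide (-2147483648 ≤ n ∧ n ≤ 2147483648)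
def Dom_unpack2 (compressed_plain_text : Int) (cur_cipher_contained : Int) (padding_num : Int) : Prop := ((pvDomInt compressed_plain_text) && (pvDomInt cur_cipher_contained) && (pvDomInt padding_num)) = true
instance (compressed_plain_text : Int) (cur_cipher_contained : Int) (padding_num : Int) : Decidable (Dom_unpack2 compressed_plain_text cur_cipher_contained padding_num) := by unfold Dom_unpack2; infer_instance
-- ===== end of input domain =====

-- B replaces A's linear shift-and-insert(0) loop by a divide-and-conquer split of the digit
-- count (cut the integer once into a high and a low part, recurse on both halves); measured
-- faster in a timing run.

-- ===== PORT A =====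
-- A: if cur == 1 return [x]; else repeatedly mask out the low digit, shift, and insert(0).
def unpack2 (compressed_plain_text : Int) (cur_cipher_contained : Int) (padding_num : Int) : List Int :=
  if cur_cipher_contained = 1 then [compressed_plain_text]
  else
    let bit_len := PySem.Int.bitLength (padding_num - 1)
    let st := (PySem.List.pyRange 0 cur_cipher_contained 1).foldl
      (fun (st : List Int × Int) _ =>
        let num := PySem.Int.band st.2 (padding_num - 1)
        (num :: st.1, st.2 >>> bit_len))   -- insert(0, num) = cons onto the result
      ([], compressed_plain_text)
    st.1

-- ===== PORT B =====
-- B's inner `split(x, n)`: n ≥ 1 digits of x, most significant first, by halving the digit count.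
def unpackSplit (mask : Int) (bl : Nat) : Nat → Int → List Int
  | 0, _ => []
  | 1, x => [PySem.Int.band x mask]
  | n+2, x =>
      unpackSplit mask bl ((n+2) - (n+2)/2) (x >>> (bl * ((n+2)/2))) ++
      unpackSplit mask bl ((n+2)/2) (PySem.Int.band x ((1 <<< (bl * ((n+2)/2))) - 1))
  termination_by n _ => n
  decreasing_by all_goals omega

-- B: handle the cur == 1 and cur < 1 cases, then divide and conquer on the digit count.
def unpack2_alt (compressed_plain_text : Int) (cur_cipher_contained : Int) (padding_num : Int) : List Int :=
  if cur_cipher_contained = 1 then [compressed_plain_text]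
  else if cur_cipher_contained < 1 then []
  else
    let mask := padding_num - 1
    let bit_len := PySem.Int.bitLength mask
    unpackSplit mask bit_len cur_cipher_contained.toNat compressed_plain_text

-- ===== PRECONDITION & SPEC =====
-- Pre_ excludes padding_num ≤ 0 with cur_cipher_contained ≥ 2: there the digit mask
-- padding_num - 1 is negative and A's output (sign-extended, unbounded "digits") is an
-- artefact of Python's infinite two's-complement AND, while B extracts genuine
-- fixed-width digits; a padding (digit modulus) below 1 is outside the function's purpose.
def Pre_unpack2 (compressed_plain_text : Int) (cur_cipher_contained : Int) (padding_num : Int) : Prop :=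
  1 ≤ padding_num ∨ cur_cipher_contained ≤ 1
instance (compressed_plain_text : Int) (cur_cipher_contained : Int) (padding_num : Int) : Decidable (Pre_unpack2 compressed_plain_text cur_cipher_contained padding_num) := by unfold Pre_unpack2; infer_instance

def pvWitness_unpack2 : Int × Int × Int := (5, 2, 2)

def Spec_unpack2 (compressed_plain_text : Int) (cur_cipher_contained : Int) (padding_num : Int) (out : List Int) : Prop := out = unpack2_alt compressed_plain_text cur_cipher_contained padding_num
instance (compressed_plain_text : Int) (cur_cipher_contained : Int) (padding_num : Int) (out : List Int) : Decidable (Spec_unpack2 compressed_plain_text cur_cipher_contained padding_num out) := by unfold Spec_unpack2; infer_instance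

-- ===== CLAIM (what is proved, stated in full; the proofs are below) =====
def Claim_equal_unpack2 : Prop := ∀ (compressed_plain_text : Int) (cur_cipher_contained : Int) (padding_num : Int), Dom_unpack2 compressed_plain_text cur_cipher_contained padding_num → Pre_unpack2 compressed_plain_text cur_cipher_contained padding_num → Spec_unpack2 compressed_plain_text cur_cipher_contained padding_num (unpack2 compressed_plain_text cur_cipher_contained padding_num)

-- ===== LEMMAS AND PROOFS =====

-- Parity of a Nat AND.
theorem nat_and_mod_two (x y : ℕ) : (x &&& y) % 2 = x % 2 * (y % 2) := by
  have h := Nat.testBit_land x y 0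
  simp only [Nat.testBit_zero, ← Bool.decide_and, decide_eq_decide] at h
  rcases Nat.mod_two_eq_zero_or_one x with hx | hx <;>
    rcases Nat.mod_two_eq_zero_or_one y with hy | hy <;>
      rw [hx, hy] at h ⊢ <;> omega

-- Halving commutes with Nat AND.
theorem nat_and_div_two (x y : ℕ) : (x &&& y) / 2 = (x / 2) &&& (y / 2) := by
  apply Nat.eq_of_testBit_eq
  intro i
  rw [← Nat.testBit_succ, Nat.testBit_land, Nat.testBit_succ, Nat.testBit_succ,
    ← Nat.testBit_land]

-- Bit-level decomposition of a Nat AND.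
theorem nat_and_decomp (x y : ℕ) : x &&& y = 2 * ((x / 2) &&& (y / 2)) + x % 2 * (y % 2) := by
  have h1 := nat_and_mod_two x y
  have h2 := nat_and_div_two x y
  rcases Nat.mod_two_eq_zero_or_one x with hx | hx <;>
    rcases Nat.mod_two_eq_zero_or_one y with hy | hy <;>
      rw [hx, hy] at h1 ⊢ <;> omega

-- Division by a power of two commutes with Nat AND.
theorem nat_and_div_pow (x y t : ℕ) : (x &&& y) / 2 ^ t = (x / 2 ^ t) &&& (y / 2 ^ t) := by
  induction t generalizing x y with
  | zero => simp
  | succ t ih =>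
    have hp : (2:ℕ) ^ (t+1) = 2 ^ t * 2 := by ring
    rw [hp, ← Nat.div_div_eq_div_mul, ← Nat.div_div_eq_div_mul, ← Nat.div_div_eq_div_mul,
      ih, nat_and_div_two]

-- Only the low k bits of w matter against a mask below 2^k.
theorem nat_mod_and (w m k : ℕ) (hm : m < 2 ^ k) : (w % 2 ^ k) &&& m = w &&& m := by
  apply Nat.eq_of_testBit_eq
  intro i
  rw [Nat.testBit_land, Nat.testBit_land, Nat.testBit_mod_two_pow]
  by_cases hi : i < k
  · simp [hi]
  · have : m.testBit i = false :=
      Nat.testBit_eq_false_of_lt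
        (lt_of_lt_of_le hm (Nat.pow_le_pow_right (by norm_num) (by omega)))
    simp [hi, this]

-- ANDing a K-bit complement: (2^K - 1 - a) &&& m = m - (m &&& a).
theorem nat_comp_and (K a m : ℕ) (ha : a < 2 ^ K) (hm : m < 2 ^ K) :
    (2 ^ K - 1 - a) &&& m = m - (m &&& a) := by
  induction K generalizing a m with
  | zero =>
    interval_cases a
    interval_cases m
    simp
  | succ K ih =>
    have hp : (2:ℕ) ^ (K+1) = 2 * 2 ^ K := by ring
    have ha2 : a / 2 < 2 ^ K := by omega
    have hm2 : m / 2 < 2 ^ K := by omega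
    have hIH := ih (a / 2) (m / 2) ha2 hm2
    have hd := nat_and_decomp (2 ^ (K+1) - 1 - a) m
    have hd2 := nat_and_decomp m a
    have e1 : (2 ^ (K+1) - 1 - a) / 2 = 2 ^ K - 1 - a / 2 := by omega
    have e2 : (2 ^ (K+1) - 1 - a) % 2 = 1 - a % 2 := by omega
    have hle : m / 2 &&& a / 2 ≤ m / 2 := Nat.and_le_left
    rw [e1, e2] at hd
    rw [hd, hd2, hIH]
    rcases Nat.mod_two_eq_zero_or_one a with h | h <;>
      rcases Nat.mod_two_eq_zero_or_one m with h' | h' <;>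
        rw [h, h'] <;> omega

-- Cast bridge for powers of two.
theorem int_cast_two_pow (S : ℕ) : ((2 ^ S : ℕ) : ℤ) = (2:ℤ) ^ S := by push_cast; ring

-- Python's x % 2^S for negative x = -n-1, written over ℕ.
theorem int_emod_neg_rep (n S : ℕ) :
    (-(n:ℤ) - 1) % (2 ^ S) = ((2 ^ S - 1 - n % 2 ^ S : ℕ) : ℤ) := by
  have hb : (0:ℤ) < 2 ^ S := by positivity
  have h1 : (0:ℤ) ≤ (n:ℤ) % 2 ^ S := Int.emod_nonneg _ (ne_of_gt hb)
  have h2 : (n:ℤ) % 2 ^ S < 2 ^ S := Int.emod_lt_of_pos _ hb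
  have e2 : (-(n:ℤ) - 1) % 2 ^ S
      = ((-(n:ℤ) - 1) + 2 ^ S * ((n:ℤ) / 2 ^ S + 1)) % 2 ^ S :=
    (Int.add_mul_emod_self_left _ _ _).symm
  have e3 : (-(n:ℤ) - 1) + 2 ^ S * ((n:ℤ) / 2 ^ S + 1) = 2 ^ S - 1 - ((n:ℤ) % 2 ^ S) := by
    rw [Int.emod_def]; ring
  rw [e2, e3, Int.emod_eq_of_lt (by omega) (by omega)]
  have hc := int_cast_two_pow S
  have hm : ((n % 2 ^ S : ℕ) : ℤ) = (n:ℤ) % 2 ^ S := by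
    rw [Int.natCast_mod, hc]
  have hlt : n % 2 ^ S < 2 ^ S := Nat.mod_lt _ (by positivity)
  omega

-- Python's x & (2^S - 1) is x % 2^S, for every integer x.
theorem band_all_ones (x : ℤ) (S : ℕ) :
    PySem.Int.band x ((1 <<< S : ℤ) - 1) = x % 2 ^ S := by
  have hsh : (1 <<< S : ℤ) = 2 ^ S := by
    rw [Nat.shiftLeft_eq]; push_cast; ring
  have hc := int_cast_two_pow S
  have hpos : (1:ℕ) ≤ 2 ^ S := Nat.one_le_two_pow
  have htn : ((2:ℤ) ^ S - 1).toNat = 2 ^ S - 1 := by omega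
  rw [hsh]
  by_cases hx : 0 ≤ x
  · rcases Int.eq_ofNat_of_zero_le hx with ⟨n, rfl⟩
    rw [PySem.Int.band_of_nonneg (by positivity) (by omega), Int.toNat_natCast, htn,
      Nat.and_two_pow_sub_one_eq_mod, Int.natCast_mod, hc]
  · rcases Int.eq_ofNat_of_zero_le (show (0:ℤ) ≤ -x - 1 by omega) with ⟨n, hn⟩
    have hx' : x = -(n:ℤ) - 1 := by omega
    rw [PySem.Int.band.eq_1]
    rw [if_neg (by omega), if_pos (by omega)]
    have hnt : (-x - 1).toNat = n := by omega
    rw [htn, hnt, Nat.and_comm, Nat.and_two_pow_sub_one_eq_mod, hx', int_emod_neg_rep]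

-- Euclidean division of the complement: (-x - 1) / d = -(x / d) - 1 for positive d.
theorem int_ediv_neg_sub_one (x d : ℤ) (hd : 0 < d) :
    (-x - 1) / d = -(x / d) - 1 := by
  have hmod1 : (0:ℤ) ≤ x % d := Int.emod_nonneg _ (ne_of_gt hd)
  have hmod2 : x % d < d := Int.emod_lt_of_pos _ hd
  have key : -x - 1 = (d - 1 - x % d) + d * (-(x / d) - 1) := by
    have h := Int.ediv_add_emod x d
    linarith
  rw [key, Int.add_mul_ediv_left _ _ (ne_of_gt hd),
    Int.ediv_eq_zero_of_lt (by omega) (by omega), zero_add]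

-- band of a Nat cast against a nonnegative mask, over ℕ.
theorem band_natCast_nonneg (u : ℕ) (mask : ℤ) (hm : 0 ≤ mask) :
    PySem.Int.band (↑u) mask = ↑(u &&& mask.toNat) := by
  rw [PySem.Int.band_of_nonneg (by positivity) hm, Int.toNat_natCast]

-- Low digit of a truncation, nonneg case (over ℕ).
theorem nat_digit_low (S t bl u m : ℕ) (hm : m < 2 ^ bl) (hts : t + bl ≤ S) :
    (u % 2 ^ S) / 2 ^ t &&& m = (u / 2 ^ t) &&& m := by
  have hS : (2:ℕ) ^ S = 2 ^ t * 2 ^ (S - t) := by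
    rw [← pow_add]; congr 1; omega
  rw [hS, Nat.mod_mul_right_div_self]
  exact nat_mod_and _ _ _
    (lt_of_lt_of_le hm (Nat.pow_le_pow_right (by norm_num) (by omega)))

-- Low digit of a truncation, negative case (over ℕ): digits of the complement.
theorem nat_digit_low_neg (S t bl y m : ℕ) (hm : m < 2 ^ bl) (hts : t + bl ≤ S) :
    (2 ^ S - 1 - y % 2 ^ S) / 2 ^ t &&& m = m - (m &&& (y / 2 ^ t)) := by
  have ht : (0:ℕ) < 2 ^ t := by positivity
  have hMd : m * 2 ^ t / 2 ^ t = m := Nat.mul_div_cancel _ ht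
  have hMlt : m * 2 ^ t < 2 ^ S := by
    calc m * 2 ^ t < 2 ^ bl * 2 ^ t := by
          exact (Nat.mul_lt_mul_right ht).mpr hm
    _ = 2 ^ (bl + t) := by rw [pow_add]
    _ ≤ 2 ^ S := Nat.pow_le_pow_right (by norm_num) (by omega)
  have step1 : (2 ^ S - 1 - y % 2 ^ S) / 2 ^ t &&& m
      = ((2 ^ S - 1 - y % 2 ^ S) &&& (m * 2 ^ t)) / 2 ^ t := by
    rw [nat_and_div_pow, hMd]
  have step2 : (2 ^ S - 1 - y % 2 ^ S) &&& (m * 2 ^ t)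
      = m * 2 ^ t - (m * 2 ^ t &&& (y % 2 ^ S)) :=
    nat_comp_and S (y % 2 ^ S) (m * 2 ^ t) (Nat.mod_lt _ (by positivity)) hMlt
  have step3 : m * 2 ^ t &&& (y % 2 ^ S) = m * 2 ^ t &&& y := by
    rw [Nat.and_comm _ (y % 2 ^ S), nat_mod_and y _ S hMlt, Nat.and_comm]
  have hdvd : (m * 2 ^ t &&& y) % 2 ^ t = 0 := by
    have e : (m * 2 ^ t &&& y) % 2 ^ t = (m * 2 ^ t &&& y) &&& (2 ^ t - 1) :=
      (Nat.and_two_pow_sub_one_eq_mod _ t).symm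
    rw [e, Nat.and_assoc, Nat.and_comm y (2 ^ t - 1), ← Nat.and_assoc,
      Nat.and_two_pow_sub_one_eq_mod, Nat.mul_mod_left, Nat.zero_and]
  obtain ⟨b', hb'⟩ : 2 ^ t ∣ (m * 2 ^ t &&& y) := Nat.dvd_of_mod_eq_zero hdvd
  have hsub : (m * 2 ^ t - (m * 2 ^ t &&& y)) / 2 ^ t = m - b' := by
    rw [hb', Nat.mul_comm (2 ^ t) b', ← Nat.sub_mul, Nat.mul_div_cancel _ ht]
  have hlow : (m * 2 ^ t &&& y) / 2 ^ t = m &&& (y / 2 ^ t) := by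
    rw [nat_and_div_pow, hMd]
  have hb'eq : b' = m &&& (y / 2 ^ t) := by
    rw [← hlow, hb', Nat.mul_div_cancel_left _ ht]
  rw [step1, step2, step3, hsub, hb'eq]

-- The digit lemma over ℤ: only the low S bits of x matter for a digit below bit S.
theorem band_digit (x mask : ℤ) (bl S t : ℕ) (hm : 0 ≤ mask)
    (hlt : mask.toNat < 2 ^ bl) (hts : t + bl ≤ S) :
    PySem.Int.band ((x % (2 ^ S : ℤ)) >>> t) mask = PySem.Int.band (x >>> t) mask := by
  have hc := int_cast_two_pow S
  have hpow : (0:ℤ) < ((2 ^ t : ℕ) : ℤ) := by exact_mod_cast (by positivity : (0:ℕ) < 2 ^ t)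
  rw [Int.shiftRight_eq_div_pow, Int.shiftRight_eq_div_pow]
  by_cases hx : 0 ≤ x
  · rcases Int.eq_ofNat_of_zero_le hx with ⟨n, rfl⟩
    have hmod : (n:ℤ) % (2:ℤ) ^ S = ((n % 2 ^ S : ℕ) : ℤ) := by rw [Int.natCast_mod, hc]
    rw [hmod, ← Int.natCast_ediv, ← Int.natCast_ediv,
      band_natCast_nonneg _ _ hm, band_natCast_nonneg _ _ hm]
    rw [nat_digit_low S t bl n mask.toNat hlt hts]
  · rcases Int.eq_ofNat_of_zero_le (show (0:ℤ) ≤ -x - 1 by omega) with ⟨n, hn⟩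
    have hrep : x % (2:ℤ) ^ S = ((2 ^ S - 1 - n % 2 ^ S : ℕ) : ℤ) := by
      rw [show x = -(n:ℤ) - 1 from by omega]
      exact int_emod_neg_rep n S
    have hneg : x / ((2 ^ t : ℕ) : ℤ) < 0 := Int.ediv_neg_of_neg_of_pos (by omega) hpow
    have hcompl : -(x / ((2 ^ t : ℕ) : ℤ)) - 1 = ((n / 2 ^ t : ℕ) : ℤ) := by
      rw [← int_ediv_neg_sub_one x _ hpow, show -x - 1 = (n:ℤ) from by omega,
        ← Int.natCast_ediv]
    rw [hrep, ← Int.natCast_ediv, band_natCast_nonneg _ _ hm]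
    rw [PySem.Int.band.eq_1, if_neg (by omega), if_pos (by omega), hcompl, Int.toNat_natCast]
    exact congrArg _ (nat_digit_low_neg S t bl n mask.toNat hlt hts)

-- B's split recursion produces the big-endian digit list.
theorem unpackSplit_eq (mask : ℤ) (bl : ℕ) (hm : 0 ≤ mask) (hlt : mask.toNat < 2 ^ bl) :
    ∀ n, 1 ≤ n → ∀ x, unpackSplit mask bl n x
      = ((List.range n).map (fun k => PySem.Int.band (x >>> (bl * k)) mask)).reverse := by
  intro n
  induction n using Nat.strong_induction_on with
  | _ n IH =>
    intro hn x
    match n, hn with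
    | 1, _ =>
      simp [unpackSplit, List.range_one]
    | (m+2), _ =>
      have h1 : 1 ≤ (m+2)/2 := by omega
      have h2 : (m+2)/2 < m+2 := by omega
      have h3 : 1 ≤ (m+2) - (m+2)/2 := by omega
      have h4 : (m+2) - (m+2)/2 < m+2 := by omega
      rw [show unpackSplit mask bl (m+2) x
          = unpackSplit mask bl ((m+2) - (m+2)/2) (x >>> (bl * ((m+2)/2))) ++
            unpackSplit mask bl ((m+2)/2) (PySem.Int.band x ((1 <<< (bl * ((m+2)/2))) - 1))
          from by rw [unpackSplit]]
      rw [IH _ h4 h3, IH _ h2 h1]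
      -- rewrite the low half's argument as a residue, then fix each digit
      have hlow : (List.range ((m+2)/2)).map
            (fun k => PySem.Int.band ((PySem.Int.band x ((1 <<< (bl * ((m+2)/2))) - 1)) >>> (bl * k)) mask)
          = (List.range ((m+2)/2)).map (fun k => PySem.Int.band (x >>> (bl * k)) mask) := by
        apply List.map_congr_left
        intro k hk
        rw [List.mem_range] at hk
        rw [band_all_ones]
        exact band_digit x mask bl (bl * ((m+2)/2)) (bl * k) hm hlt
          (by calc bl * k + bl = bl * (k + 1) := by ring
            _ ≤ bl * ((m+2)/2) := Nat.mul_le_mul_left bl (by omega))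
      have hhigh : (List.range ((m+2) - (m+2)/2)).map
            (fun k => PySem.Int.band ((x >>> (bl * ((m+2)/2))) >>> (bl * k)) mask)
          = (List.range ((m+2) - (m+2)/2)).map
            (fun k => PySem.Int.band (x >>> (bl * ((m+2)/2 + k))) mask) := by
        apply List.map_congr_left
        intro k _
        rw [← Int.shiftRight_add, ← Nat.mul_add]
      rw [hlow, hhigh, ← List.reverse_append]
      congr 1
      rw [show List.range (m+2) = List.range ((m+2)/2 + ((m+2) - (m+2)/2)) from by
            congr 1; omega,
        List.range_add, List.map_append, List.map_map]
      rfl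

-- A's loop invariant: starting from (acc, x), after l.length iterations the result list is
-- the digits of x (low to high), reversed, in front of acc.
theorem unpack2_loop_eq (m : Int) (bl : Nat) :
    ∀ (l : List Int) (acc : List Int) (x : Int),
      (l.foldl (fun (st : List Int × Int) _ =>
          (PySem.Int.band st.2 m :: st.1, st.2 >>> bl)) (acc, x)).1
        = ((List.range l.length).map
            (fun k => PySem.Int.band (x >>> (bl * k)) m)).reverse ++ acc := by
  intro l
  induction l with
  | nil => simp
  | cons a t ih =>
    intro acc x
    simp only [List.foldl_cons, List.length_cons]
    rw [ih (PySem.Int.band x m :: acc) (x >>> bl)]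
    rw [List.range_succ_eq_map]
    simp only [List.map_cons, List.map_map, List.reverse_cons, List.append_assoc,
      List.singleton_append, Nat.mul_zero]
    congr 1
    · congr 1
      apply List.map_congr_left
      intro k _
      simp only [Function.comp, Nat.succ_eq_add_one]
      rw [show bl * (k + 1) = bl + bl * k from by ring, Int.shiftRight_add]
    · rw [Int.shiftRight_zero]

-- ===== VERDICT (by name: the statement is the Claim_ definition above) =====
theorem unpack2_spec : Claim_equal_unpack2 := by
  intro x c p _ hpre
  unfold Spec_unpack2 unpack2 unpack2_alt
  by_cases hc1 : c = 1
  · simp [hc1]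
  · simp only [hc1, if_false]
    by_cases hc0 : c < 1
    · have hlen : (PySem.List.pyRange 0 c 1).length = 0 := by
        rw [PySem.List.length_pyRange_one]; omega
      rw [List.eq_nil_of_length_eq_zero hlen]
      simp [hc0]
    · have hc2 : 2 ≤ c := by omega
      have hp : 1 ≤ p := by
        rcases hpre with hp | h
        · exact hp
        · omega
      have hm : (0:ℤ) ≤ p - 1 := by omega
      have hlt : (p - 1).toNat < 2 ^ (PySem.Int.bitLength (p - 1)) := by
        have := PySem.Int.lt_two_pow_bitLength (p - 1)
        omega
      simp only [if_neg hc0]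
      rw [unpack2_loop_eq, PySem.List.length_pyRange_one,
        unpackSplit_eq (p - 1) _ hm hlt c.toNat (by omega) x]
      simp
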